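-- pv_equiv track=rewrite | github.com/EyeSeeTea/security-tests | scripts/estimate_introduced_candidates_from_sarif.py | group_rule_ids_by_severity
-- ===== SOURCE A (Python) =====
-- from typing import Any, Dict, List, Set, Tuple
--
-- def group_rule_ids_by_severity(severity_by_rule: Dict[str, str]) -> Dict[str, List[str]]:
--     grouped: Dict[str, List[str]] = {
--         "critical": [],
--         "high": [],
--         "medium": [],
--         "low": [],
--         "unknown": [],
--     }
--     for rule_id in sorted(severity_by_rule.keys()):
--         sev = severity_by_rule.get(rule_id, "unknown")
--         if sev not in grouped:
--             sev = "unknown"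
--         grouped[sev].append(rule_id)
--     return grouped
-- ===== SOURCE B (Python) =====
-- def group_rule_ids_by_severity(severity_by_rule):
--     # Per-bucket construction: for each of the five fixed severities, one filter
--     # pass over the items selects its rule ids, which are then sorted.
--     keys = ("critical", "high", "medium", "low", "unknown")
--     return {
--         sev: sorted(rid for rid, s in severity_by_rule.items()
--                     if (s if s in keys else "unknown") == sev)
--         for sev in keys
--     }
-- ===== Notes on version B (the rewrite author's own statement) =====
-- stated objective: alternative
-- what changed: B builds each of the five buckets independently by a filter-then-sort comprehension over the items, instead of A's sort-all-keys-first followed by a stateful grouping loop over a mutable dict.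
import Mathlib
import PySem

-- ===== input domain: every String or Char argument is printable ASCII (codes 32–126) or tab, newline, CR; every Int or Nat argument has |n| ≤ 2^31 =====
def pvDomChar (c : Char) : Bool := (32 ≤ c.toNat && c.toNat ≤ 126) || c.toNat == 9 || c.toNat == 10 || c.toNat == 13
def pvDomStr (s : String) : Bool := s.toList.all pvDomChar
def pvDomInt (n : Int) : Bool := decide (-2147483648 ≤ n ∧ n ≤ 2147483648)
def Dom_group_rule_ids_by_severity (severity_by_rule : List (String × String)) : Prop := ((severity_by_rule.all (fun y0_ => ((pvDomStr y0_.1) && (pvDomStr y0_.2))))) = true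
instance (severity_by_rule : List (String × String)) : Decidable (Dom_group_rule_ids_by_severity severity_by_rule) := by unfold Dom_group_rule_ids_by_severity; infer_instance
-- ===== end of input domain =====

-- B builds each of the five buckets independently by filtering the items and sorting the
-- result, instead of A's sort-all-keys-first then stateful grouping loop (alternative decomposition).


-- ===== PORT A =====
def group_rule_ids_by_severity (severity_by_rule : List (String × String)) : List (String × List String) :=
  let d : PySem.Dict String String := PySem.Dict.mk severity_by_rule
  let grouped : PySem.Dict String (List String) :=
    PySem.Dict.mk [("critical", []), ("high", []), ("medium", []), ("low", []), ("unknown", [])]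
  let grouped :=
    (PySem.List.sorted d.keys (fun x => x) false).foldl
      (fun g rule_id =>
        let sev := d.getD rule_id "unknown"
        let sev := if g.contains sev then sev else "unknown"
        g.modify sev [] (fun xs => xs ++ [rule_id])) grouped
  grouped.items

-- ===== PORT B =====
-- the fixed tuple of bucket names
def pvBKeys : List String := ["critical", "high", "medium", "low", "unknown"]

def group_rule_ids_by_severity_alt (severity_by_rule : List (String × String)) : List (String × List String) :=
  pvBKeys.map (fun sev =>
    (sev, PySem.List.sorted
      ((severity_by_rule.filter
          (fun p => (if pvBKeys.contains p.2 then p.2 else "unknown") == sev)).map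
        (fun p => p.1)) (fun x => x) false))

-- ===== PRECONDITION & SPEC =====
-- The Python parameter is a dict, whose keys are necessarily distinct; association
-- lists with duplicate keys do not represent any dict input, so Pre_ excludes them.
def Pre_group_rule_ids_by_severity (severity_by_rule : List (String × String)) : Prop :=
  (severity_by_rule.map (fun p => p.1)).Nodup
instance (severity_by_rule : List (String × String)) : Decidable (Pre_group_rule_ids_by_severity severity_by_rule) := by unfold Pre_group_rule_ids_by_severity; infer_instance
def pvWitness_group_rule_ids_by_severity : (List (String × String)) := [("r2", "high"), ("r1", "bogus"), ("r3", "low")]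

def Spec_group_rule_ids_by_severity (severity_by_rule : List (String × String)) (out : List (String × List String)) : Prop := out = group_rule_ids_by_severity_alt severity_by_rule
instance (severity_by_rule : List (String × String)) (out : List (String × List String)) : Decidable (Spec_group_rule_ids_by_severity severity_by_rule out) := by unfold Spec_group_rule_ids_by_severity; infer_instance

-- ===== CLAIM (what is proved, stated in full; the proofs are below) =====
def Claim_equal_group_rule_ids_by_severity : Prop := ∀ (severity_by_rule : List (String × String)), Dom_group_rule_ids_by_severity severity_by_rule → Pre_group_rule_ids_by_severity severity_by_rule → Spec_group_rule_ids_by_severity severity_by_rule (group_rule_ids_by_severity severity_by_rule)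

-- ===== LEMMAS AND PROOFS =====

-- the classification both programs compute
def pvCls (s : String) : String := if s ∈ pvBKeys then s else "unknown"
def pvInit5 : PySem.Dict String (List String) :=
  PySem.Dict.mk [("critical", []), ("high", []), ("medium", []), ("low", []), ("unknown", [])]

lemma pvCls_mem (s : String) : pvCls s ∈ pvBKeys := by
  unfold pvCls; split_ifs with h
  · exact h
  · decide

lemma pvBKeys_contains (s : String) :
    (if pvBKeys.contains s then s else "unknown") = pvCls s := by
  unfold pvCls
  by_cases h : s ∈ pvBKeys <;> simp [h]

lemma pvKeys_modify (g : PySem.Dict String (List String)) (k : String)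
    (f : List String → List String) (hk : g.keys = pvBKeys) (hmem : k ∈ pvBKeys) :
    (g.modify k [] f).keys = pvBKeys := by
  rw [PySem.Dict.keys_modify, PySem.Dict.keys_insert_of_contains, hk]
  rw [PySem.Dict.contains_eq_decide_mem_keys, hk]
  simpa using hmem

lemma pvContains_cls (g : PySem.Dict String (List String)) (s : String) (hk : g.keys = pvBKeys) :
    (if g.contains s then s else "unknown") = pvCls s := by
  rw [PySem.Dict.contains_eq_decide_mem_keys, hk, pvCls]
  by_cases h : s ∈ pvBKeys <;> simp [h]

-- A's dynamic "sev in grouped" test is the static classification pvCls, and the loop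
-- is the standard (key, value)-pair grouping fold.
lemma pvFoldA_norm (d : PySem.Dict String String) :
    ∀ (l : List String) (g : PySem.Dict String (List String)), g.keys = pvBKeys →
    l.foldl (fun g rule_id =>
        let sev := d.getD rule_id "unknown"
        let sev := if g.contains sev then sev else "unknown"
        g.modify sev [] (fun xs => xs ++ [rule_id])) g
    = (l.map (fun rid => (pvCls (d.getD rid "unknown"), rid))).foldl
        (fun g p => g.modify p.1 [] (fun xs => xs ++ [p.2])) g := by
  intro l
  induction l with
  | nil => intro g _; rfl
  | cons a t ih =>
    intro g hk
    simp only [List.foldl_cons, List.map_cons]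
    rw [pvContains_cls g _ hk,
      ih _ (pvKeys_modify g _ _ hk (pvCls_mem _))]

lemma pvInit5_getD (k : String) : pvInit5.getD k [] = [] := by
  rw [PySem.Dict.getD_eq_get?_getD]
  show (Option.getD (PySem.Dict.get? pvInit5 k) [])  = []
  unfold pvInit5
  rw [PySem.Dict.get?_mk_cons, PySem.Dict.get?_mk_cons, PySem.Dict.get?_mk_cons,
    PySem.Dict.get?_mk_cons, PySem.Dict.get?_mk_cons]
  split_ifs <;> rfl

-- the standard grouping fold from the five empty buckets, as a closed form on items
lemma pvFold_items (l : List (String × String)) (h : ∀ p ∈ l, p.1 ∈ pvBKeys) :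
    (l.foldl (fun g p => g.modify p.1 [] (fun xs => xs ++ [p.2])) pvInit5).items
    = pvBKeys.map (fun c => (c, (l.filter (fun p => p.1 == c)).map (fun p => p.2))) := by
  have hkeys : (l.foldl (fun g p => g.modify p.1 [] (fun xs => xs ++ [p.2])) pvInit5).keys = pvBKeys := by
    have := PySem.Dict.keys_foldl_modify_key l (fun p => p.1) []
      (fun _ p => fun xs => xs ++ [p.2]) pvInit5
    rw [this]
    have hinit : pvInit5.keys = pvBKeys := by decide
    rw [hinit, PySem.Set.update_eq_append_filter]
    have : ((PySem.Set.ofList (l.map fun p => p.1)).filter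
        (fun y => !PySem.Set.contains pvBKeys y)) = [] := by
      rw [List.filter_eq_nil_iff]
      intro y hy
      have : y ∈ l.map fun p => p.1 := (PySem.Set.mem_ofList _ _).1 hy
      obtain ⟨p, hp, rfl⟩ := List.mem_map.1 this
      simp [PySem.Set.contains_eq_listContains, h p hp]
    rw [this, List.append_nil]
  have hnd : (l.foldl (fun g p => g.modify p.1 [] (fun xs => xs ++ [p.2])) pvInit5).keys.Nodup := by
    exact PySem.Dict.nodup_keys_foldl_modify_key l (fun p => p.1) []
      (fun _ p => fun xs => xs ++ [p.2]) pvInit5 (by decide)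
  rw [PySem.Dict.items_eq_map_keys _ hnd [], hkeys]
  refine List.map_congr_left (fun c _ => ?_)
  rw [PySem.Dict.getD_foldl_modify_append, pvInit5_getD, List.nil_append]

-- first components of a dup-free association list, filtered through the lookup
lemma pvFilter_keys (m : List (String × String)) (hnd : (m.map (fun p => p.1)).Nodup) (P : String → String → Bool) :
    (m.map (fun p => p.1)).filter
        (fun k => P k ((PySem.Dict.mk m : PySem.Dict String String).getD k "unknown"))
    = (m.filter (fun p => P p.1 p.2)).map (fun p => p.1) := by
  induction m with
  | nil => rfl
  | cons a t ih =>
    obtain ⟨k, v⟩ := a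
    simp only [List.map_cons, List.nodup_cons] at hnd ⊢
    have hhead : (PySem.Dict.mk ((k, v) :: t) : PySem.Dict String String).getD k "unknown" = v := by
      rw [PySem.Dict.getD_eq_get?_getD, PySem.Dict.get?_mk_cons]
      simp
    have htail : ∀ k' ∈ t.map (fun p => p.1),
        (PySem.Dict.mk ((k, v) :: t) : PySem.Dict String String).getD k' "unknown"
        = (PySem.Dict.mk t : PySem.Dict String String).getD k' "unknown" := by
      intro k' hk'
      have hne : k ≠ k' := fun h => hnd.1 (h ▸ hk')
      rw [PySem.Dict.getD_eq_get?_getD, PySem.Dict.get?_mk_cons, PySem.Dict.getD_eq_get?_getD]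
      simp [hne]
    rw [List.filter_cons, List.filter_cons, hhead]
    have hrest : (t.map (fun p => p.1)).filter
        (fun k' => P k' ((PySem.Dict.mk ((k, v) :: t) : PySem.Dict String String).getD k' "unknown"))
        = (t.filter (fun p => P p.1 p.2)).map (fun p => p.1) := by
      rw [List.filter_congr (fun k' hk' => by rw [htail k' hk']), ih hnd.2]
    by_cases hP : P k v = true
    · simp only [hP, if_true, List.map_cons, hrest]
    · simp [hP, hrest]

-- per-bucket core: filtering the sorted key list = sorting the filtered key list
lemma pvCore (m : List (String × String)) (hnd : (m.map (fun p => p.1)).Nodup) (c : String) :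
    ((PySem.List.sorted ((PySem.Dict.mk m : PySem.Dict String String).keys) (fun x => x) false).filter
        (fun rid => pvCls ((PySem.Dict.mk m : PySem.Dict String String).getD rid "unknown") == c))
    = PySem.List.sorted ((m.filter (fun p => pvCls p.2 == c)).map (fun p => p.1)) (fun x => x) false := by
  have hkeys : (PySem.Dict.mk m : PySem.Dict String String).keys = m.map (fun p => p.1) := rfl
  set q : String → Bool :=
    fun rid => pvCls ((PySem.Dict.mk m : PySem.Dict String String).getD rid "unknown") == c with hq
  have hsub1 : (m.map (fun p => p.1)).filter q = (m.filter (fun p => pvCls p.2 == c)).map (fun p => p.1) := by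
    exact pvFilter_keys m hnd (fun _ v => pvCls v == c)
  symm
  apply PySem.List.sorted_eq_of_perm_of_pairwise_lt
  · rw [← hsub1, hkeys]
    exact (PySem.List.sorted_perm _ _ _).filter q
  · have hle : List.Pairwise (fun a b : String => a ≤ b)
        (PySem.List.sorted ((PySem.Dict.mk m : PySem.Dict String String).keys) (fun x => x) false) := by
      exact PySem.List.sorted_pairwise _ _
    have hnodup : (PySem.List.sorted ((PySem.Dict.mk m : PySem.Dict String String).keys) (fun x => x) false).Nodup := by
      exact ((PySem.List.sorted_perm _ _ _).nodup_iff).2 (hkeys ▸ hnd)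
    exact ((hle.and hnodup).imp (fun h => lt_of_le_of_ne h.1 h.2)).filter q

-- ===== VERDICT (by name: the statement is the Claim_ definition above) =====
theorem group_rule_ids_by_severity_spec : Claim_equal_group_rule_ids_by_severity := by
  intro m _ hnd
  unfold Spec_group_rule_ids_by_severity group_rule_ids_by_severity group_rule_ids_by_severity_alt
  have hinitkeys : (PySem.Dict.mk [("critical", ([] : List String)), ("high", []), ("medium", []),
      ("low", []), ("unknown", [])] : PySem.Dict String (List String)).keys = pvBKeys := by decide
  simp only []
  rw [pvFoldA_norm _ _ _ hinitkeys]
  show (_root_.List.foldl _ pvInit5 _).items = _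
  rw [pvFold_items _ (by
      intro p hp
      obtain ⟨rid, _, rfl⟩ := List.mem_map.1 hp
      exact pvCls_mem _)]
  refine List.map_congr_left (fun c _ => ?_)
  rw [List.filter_map, List.map_map]
  dsimp only [Function.comp_def]
  rw [List.map_id']
  rw [pvCore m hnd c]
  simp only [pvBKeys_contains]
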